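-- pv_equiv track=rewrite | github.com/opendalle/The-Godfather-Intel | db/client.py | _same_market
-- ===== SOURCE A (Python) =====
-- LOCATION_CLUSTERS = {
--     "Mumbai": {
--         "Mumbai", "BKC", "Lower Parel", "Worli", "Andheri", "Malad", "Goregaon",
--         "Powai", "Vikhroli", "Thane", "Navi Mumbai", "Airoli", "Belapur", "Kharghar",
--         "Vashi", "Wadala", "Chembur", "Kurla", "Bandra", "MMR",
--     },
--     "Bengaluru": {
--         "Bengaluru", "Bangalore", "Whitefield", "Electronic City", "Sarjapur",
--         "Koramangala", "HSR Layout", "Indiranagar", "ORR", "Manyata", "Hebbal",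
--     },
--     "Hyderabad": {
--         "Hyderabad", "HiTec City", "Gachibowli", "Madhapur", "Kondapur",
--         "Financial District", "Cyberabad",
--     },
--     "Pune": {
--         "Pune", "Hinjewadi", "Wakad", "Baner", "Viman Nagar", "Kharadi",
--         "Magarpatta", "Hadapsar",
--     },
--     "Chennai": {
--         "Chennai", "Tidel Park", "Perungudi", "Sholinganallur", "OMR",
--         "Mount Road", "Nungambakkam",
--     },
--     "NCR": {
--         "NCR", "Delhi", "Gurgaon", "Gurugram", "Noida", "Greater Noida",
--         "Cyber City", "Sohna Road", "Cyber Hub", "Faridabad",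
--     },
--     "India": set(),  # India = matches any city (low specificity)
-- }
--
-- def _same_market(loc1: str, loc2: str) -> bool:
--     """Returns True if loc1 and loc2 are in the same geographic market."""
--     if not loc1 or not loc2:
--         return True  # Unknown location = possible match
--     if loc1 == loc2:
--         return True
--     if "India" in (loc1, loc2):
--         return True  # "India" demand matches any specific supply
--
--     # Normalize
--     l1 = loc1.strip().title()
--     l2 = loc2.strip().title()
--
--     for cluster_name, aliases in LOCATION_CLUSTERS.items():
--         aliases_lower = {a.lower() for a in aliases} | {cluster_name.lower()}
--         if l1.lower() in aliases_lower and l2.lower() in aliases_lower: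
--             return True
--         if l1.lower() == cluster_name.lower() and l2.lower() in aliases_lower:
--             return True
--         if l2.lower() == cluster_name.lower() and l1.lower() in aliases_lower:
--             return True
--
--     return False
-- ===== SOURCE B (Python) =====
-- """B: one flat precomputed table (lowercased alias -> market name) instead of
-- A's per-call scan over all clusters; a membership test plus one equality answers the query."""
--
-- _MARKET_OF = {
--     "mumbai": "Mumbai",
--     "bkc": "Mumbai",
--     "lower parel": "Mumbai",
--     "worli": "Mumbai",
--     "andheri": "Mumbai",
--     "malad": "Mumbai",
--     "goregaon": "Mumbai",
--     "powai": "Mumbai",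
--     "vikhroli": "Mumbai",
--     "thane": "Mumbai",
--     "navi mumbai": "Mumbai",
--     "airoli": "Mumbai",
--     "belapur": "Mumbai",
--     "kharghar": "Mumbai",
--     "vashi": "Mumbai",
--     "wadala": "Mumbai",
--     "chembur": "Mumbai",
--     "kurla": "Mumbai",
--     "bandra": "Mumbai",
--     "mmr": "Mumbai",
--     "bengaluru": "Bengaluru",
--     "bangalore": "Bengaluru",
--     "whitefield": "Bengaluru",
--     "electronic city": "Bengaluru",
--     "sarjapur": "Bengaluru",
--     "koramangala": "Bengaluru",
--     "hsr layout": "Bengaluru",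
--     "indiranagar": "Bengaluru",
--     "orr": "Bengaluru",
--     "manyata": "Bengaluru",
--     "hebbal": "Bengaluru",
--     "hyderabad": "Hyderabad",
--     "hitec city": "Hyderabad",
--     "gachibowli": "Hyderabad",
--     "madhapur": "Hyderabad",
--     "kondapur": "Hyderabad",
--     "financial district": "Hyderabad",
--     "cyberabad": "Hyderabad",
--     "pune": "Pune",
--     "hinjewadi": "Pune",
--     "wakad": "Pune",
--     "baner": "Pune",
--     "viman nagar": "Pune",
--     "kharadi": "Pune",
--     "magarpatta": "Pune",
--     "hadapsar": "Pune",
--     "chennai": "Chennai",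
--     "tidel park": "Chennai",
--     "perungudi": "Chennai",
--     "sholinganallur": "Chennai",
--     "omr": "Chennai",
--     "mount road": "Chennai",
--     "nungambakkam": "Chennai",
--     "ncr": "NCR",
--     "delhi": "NCR",
--     "gurgaon": "NCR",
--     "gurugram": "NCR",
--     "noida": "NCR",
--     "greater noida": "NCR",
--     "cyber city": "NCR",
--     "sohna road": "NCR",
--     "cyber hub": "NCR",
--     "faridabad": "NCR",
--     "india": "India",
-- }
--
--
--
-- def _same_market(loc1: str, loc2: str) -> bool:
--     """Returns True if loc1 and loc2 are in the same geographic market."""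
--     if not loc1 or not loc2 or loc1 == loc2 or "India" in (loc1, loc2):
--         return True
--     m1 = _MARKET_OF.get(loc1.strip().lower())
--     if m1 is None:
--         return False
--     return _MARKET_OF.get(loc2.strip().lower()) == m1
-- ===== Notes on version B (the rewrite author's own statement) =====
-- stated objective: faster
-- what changed: B replaces A's per-call scan over all clusters (which rebuilds every lowercased alias set on each call) with one flat precomputed table lowercased-alias -> market name; a call is two dictionary lookups and one string equality, exploiting that each alias belongs to exactly one cluster.
import Mathlib
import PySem

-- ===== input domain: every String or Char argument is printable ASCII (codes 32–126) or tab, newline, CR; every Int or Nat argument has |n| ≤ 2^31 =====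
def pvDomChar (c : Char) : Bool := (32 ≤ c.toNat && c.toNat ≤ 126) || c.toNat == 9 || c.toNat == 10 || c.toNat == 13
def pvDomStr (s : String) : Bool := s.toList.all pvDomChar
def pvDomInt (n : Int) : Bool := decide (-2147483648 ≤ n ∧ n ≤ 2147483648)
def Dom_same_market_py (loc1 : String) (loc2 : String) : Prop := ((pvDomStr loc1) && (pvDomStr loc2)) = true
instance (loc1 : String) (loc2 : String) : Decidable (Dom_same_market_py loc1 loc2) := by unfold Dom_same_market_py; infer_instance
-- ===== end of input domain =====

-- B answers each call from one flat precomputed table lowercased-alias -> market name (each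
-- alias belongs to exactly one cluster) instead of A's per-call scan that rebuilds every
-- lowercased alias set; equivalence of the return values is proved below.

-- ===== PORT A =====
-- hand port of str.title(): a letter after a non-letter is uppercased, other letters lowercased
-- (exact on ASCII input: printable ASCII has no cased characters besides A-Z/a-z)
def titleChars (prev : Bool) : List Char → List Char
  | [] => []
  | c :: cs =>
    (if PySem.Chars.isalpha c then
        (if prev then PySem.Chars.lowerChar c else PySem.Chars.upperChar c)
      else c) :: titleChars (PySem.Chars.isalpha c) cs

def pyTitle (s : String) : String := String.ofList (titleChars false s.toList)

def LOCATION_CLUSTERS : List (String × PySem.Set String) :=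
  [ ("Mumbai", PySem.Set.ofList ["Mumbai", "BKC", "Lower Parel", "Worli", "Andheri", "Malad",
      "Goregaon", "Powai", "Vikhroli", "Thane", "Navi Mumbai", "Airoli", "Belapur", "Kharghar",
      "Vashi", "Wadala", "Chembur", "Kurla", "Bandra", "MMR"]),
    ("Bengaluru", PySem.Set.ofList ["Bengaluru", "Bangalore", "Whitefield", "Electronic City",
      "Sarjapur", "Koramangala", "HSR Layout", "Indiranagar", "ORR", "Manyata", "Hebbal"]),
    ("Hyderabad", PySem.Set.ofList ["Hyderabad", "HiTec City", "Gachibowli", "Madhapur",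
      "Kondapur", "Financial District", "Cyberabad"]),
    ("Pune", PySem.Set.ofList ["Pune", "Hinjewadi", "Wakad", "Baner", "Viman Nagar", "Kharadi",
      "Magarpatta", "Hadapsar"]),
    ("Chennai", PySem.Set.ofList ["Chennai", "Tidel Park", "Perungudi", "Sholinganallur", "OMR",
      "Mount Road", "Nungambakkam"]),
    ("NCR", PySem.Set.ofList ["NCR", "Delhi", "Gurgaon", "Gurugram", "Noida", "Greater Noida",
      "Cyber City", "Sohna Road", "Cyber Hub", "Faridabad"]),
    ("India", PySem.Set.empty) ]

def same_market_py (loc1 : String) (loc2 : String) : Bool :=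
  if loc1 = "" ∨ loc2 = "" then true
  else if loc1 = loc2 then true
  else if loc1 = "India" ∨ loc2 = "India" then true
  else
    let l1 := pyTitle (PySem.Str.strip loc1)
    let l2 := pyTitle (PySem.Str.strip loc2)
    LOCATION_CLUSTERS.any (fun p =>
      let aliasesLower := PySem.Set.union (PySem.Set.ofList (p.2.map PySem.Str.lower))
        [PySem.Str.lower p.1]
      (aliasesLower.contains (PySem.Str.lower l1) && aliasesLower.contains (PySem.Str.lower l2))
      || (PySem.Str.lower l1 == PySem.Str.lower p.1 && aliasesLower.contains (PySem.Str.lower l2))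
      || (PySem.Str.lower l2 == PySem.Str.lower p.1 && aliasesLower.contains (PySem.Str.lower l1)))

-- ===== PORT B =====
-- the flat table, written out literally in Source B as a dict literal
def MARKET_OF : PySem.Dict String String := PySem.Dict.ofList
  [ ("mumbai", "Mumbai"),
    ("bkc", "Mumbai"),
    ("lower parel", "Mumbai"),
    ("worli", "Mumbai"),
    ("andheri", "Mumbai"),
    ("malad", "Mumbai"),
    ("goregaon", "Mumbai"),
    ("powai", "Mumbai"),
    ("vikhroli", "Mumbai"),
    ("thane", "Mumbai"),
    ("navi mumbai", "Mumbai"),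
    ("airoli", "Mumbai"),
    ("belapur", "Mumbai"),
    ("kharghar", "Mumbai"),
    ("vashi", "Mumbai"),
    ("wadala", "Mumbai"),
    ("chembur", "Mumbai"),
    ("kurla", "Mumbai"),
    ("bandra", "Mumbai"),
    ("mmr", "Mumbai"),
    ("bengaluru", "Bengaluru"),
    ("bangalore", "Bengaluru"),
    ("whitefield", "Bengaluru"),
    ("electronic city", "Bengaluru"),
    ("sarjapur", "Bengaluru"),
    ("koramangala", "Bengaluru"),
    ("hsr layout", "Bengaluru"),
    ("indiranagar", "Bengaluru"),
    ("orr", "Bengaluru"),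
    ("manyata", "Bengaluru"),
    ("hebbal", "Bengaluru"),
    ("hyderabad", "Hyderabad"),
    ("hitec city", "Hyderabad"),
    ("gachibowli", "Hyderabad"),
    ("madhapur", "Hyderabad"),
    ("kondapur", "Hyderabad"),
    ("financial district", "Hyderabad"),
    ("cyberabad", "Hyderabad"),
    ("pune", "Pune"),
    ("hinjewadi", "Pune"),
    ("wakad", "Pune"),
    ("baner", "Pune"),
    ("viman nagar", "Pune"),
    ("kharadi", "Pune"),
    ("magarpatta", "Pune"),
    ("hadapsar", "Pune"),
    ("chennai", "Chennai"),
    ("tidel park", "Chennai"),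
    ("perungudi", "Chennai"),
    ("sholinganallur", "Chennai"),
    ("omr", "Chennai"),
    ("mount road", "Chennai"),
    ("nungambakkam", "Chennai"),
    ("ncr", "NCR"),
    ("delhi", "NCR"),
    ("gurgaon", "NCR"),
    ("gurugram", "NCR"),
    ("noida", "NCR"),
    ("greater noida", "NCR"),
    ("cyber city", "NCR"),
    ("sohna road", "NCR"),
    ("cyber hub", "NCR"),
    ("faridabad", "NCR"),
    ("india", "India") ]

def same_market_py_alt (loc1 : String) (loc2 : String) : Bool :=
  if loc1 = "" ∨ loc2 = "" ∨ loc1 = loc2 ∨ loc1 = "India" ∨ loc2 = "India" then true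
  else
    match MARKET_OF.get? (PySem.Str.lower (PySem.Str.strip loc1)) with
    | none => false
    | some m1 => MARKET_OF.get? (PySem.Str.lower (PySem.Str.strip loc2)) == some m1

-- ===== PRECONDITION & SPEC =====
def Spec_same_market_py (loc1 : String) (loc2 : String) (out : Bool) : Prop := out = same_market_py_alt loc1 loc2
instance (loc1 : String) (loc2 : String) (out : Bool) : Decidable (Spec_same_market_py loc1 loc2 out) := by unfold Spec_same_market_py; infer_instance

-- ===== CLAIM (what is proved, stated in full; the proofs are below) =====
def Claim_equal_same_market_py : Prop := ∀ (loc1 : String) (loc2 : String), Dom_same_market_py loc1 loc2 → Spec_same_market_py loc1 loc2 (same_market_py loc1 loc2)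

-- ===== LEMMAS AND PROOFS =====

theorem charLe (a c : Char) : (a ≤ c) ↔ a.toNat ≤ c.toNat := Iff.rfl

theorem lowerChar_eq_of_upper (c : Char) (h : PySem.Chars.isupper c = true) :
    PySem.Chars.lowerChar c = Char.ofNat (c.toNat + 32) := by
  unfold PySem.Chars.lowerChar
  rw [if_pos h]

theorem isupper_bounds (c : Char) (h : PySem.Chars.isupper c = true) :
    65 ≤ c.toNat ∧ c.toNat ≤ 90 := by
  unfold PySem.Chars.isupper at h
  simp only [Bool.and_eq_true, decide_eq_true_eq] at h
  exact ⟨(charLe 'A' c).mp h.1, (charLe c 'Z').mp h.2⟩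

theorem lowerChar_id_of_not_upper (c : Char) (h : ¬ PySem.Chars.isupper c = true) :
    PySem.Chars.lowerChar c = c := by
  unfold PySem.Chars.lowerChar
  rw [if_neg h]

theorem lowerChar_lowerChar (c : Char) :
    PySem.Chars.lowerChar (PySem.Chars.lowerChar c) = PySem.Chars.lowerChar c := by
  by_cases h : PySem.Chars.isupper c = true
  · obtain ⟨h1, h2⟩ := isupper_bounds c h
    have hv : (Char.ofNat (c.toNat + 32)).toNat = c.toNat + 32 := by
      rw [Char.toNat_ofNat, if_pos]; left; omega
    rw [lowerChar_eq_of_upper c h]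
    apply lowerChar_id_of_not_upper
    intro hx
    obtain ⟨hx1, hx2⟩ := isupper_bounds _ hx
    rw [hv] at hx1 hx2
    omega
  · rw [lowerChar_id_of_not_upper c h, lowerChar_id_of_not_upper c h]

theorem lowerChar_upperChar (c : Char) :
    PySem.Chars.lowerChar (PySem.Chars.upperChar c) = PySem.Chars.lowerChar c := by
  by_cases h : PySem.Chars.islower c = true
  · have hb : 97 ≤ c.toNat ∧ c.toNat ≤ 122 := by
      unfold PySem.Chars.islower at h
      simp only [Bool.and_eq_true, decide_eq_true_eq] at h
      exact ⟨(charLe 'a' c).mp h.1, (charLe c 'z').mp h.2⟩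
    have hv : (Char.ofNat (c.toNat - 32)).toNat = c.toNat - 32 := by
      rw [Char.toNat_ofNat, if_pos]; left; omega
    have hup : PySem.Chars.upperChar c = Char.ofNat (c.toNat - 32) := by
      unfold PySem.Chars.upperChar
      rw [if_pos h]
    have hu : PySem.Chars.isupper (Char.ofNat (c.toNat - 32)) = true := by
      unfold PySem.Chars.isupper
      simp only [Bool.and_eq_true, decide_eq_true_eq, charLe, hv]
      refine ⟨?_, ?_⟩
      · show (65:Nat) ≤ _ ; omega
      · show _ ≤ (90:Nat) ; omega
    rw [hup, lowerChar_eq_of_upper _ hu, hv]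
    have h32 : c.toNat - 32 + 32 = c.toNat := by omega
    rw [h32, Char.ofNat_toNat]
    rw [lowerChar_id_of_not_upper c]
    intro hx
    obtain ⟨hx1, hx2⟩ := isupper_bounds _ hx
    omega
  · have hup : PySem.Chars.upperChar c = c := by
      unfold PySem.Chars.upperChar
      rw [if_neg h]
    rw [hup]

theorem lower_titleChars (b : Bool) (cs : List Char) :
    PySem.Chars.lower (titleChars b cs) = PySem.Chars.lower cs := by
  induction cs generalizing b with
  | nil => rfl
  | cons c cs ih =>
    simp only [titleChars, PySem.Chars.lower, List.map_cons] at *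
    rw [ih]
    split_ifs with h1 h2 <;> simp [lowerChar_lowerChar, lowerChar_upperChar]

theorem lower_pyTitle (s : String) :
    PySem.Str.lower (pyTitle s) = PySem.Str.lower s := by
  simp [pyTitle, PySem.Str.lower, String.toList_ofList, lower_titleChars]

-- "t names cluster p" : t is the lowercase of one of p's aliases or of p's name
def InCluster (p : String × PySem.Set String) (t : String) : Prop :=
  t ∈ p.2.map PySem.Str.lower ∨ t = PySem.Str.lower p.1

-- the flat table is exactly the clusters laid out alias by alias
set_option maxRecDepth 100000 in
theorem items_eq : MARKET_OF.items =
    LOCATION_CLUSTERS.flatMap (fun p =>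
      (PySem.Set.union (PySem.Set.ofList (p.2.map PySem.Str.lower))
        [PySem.Str.lower p.1]).map (fun a => (a, p.1))) := by decide

set_option maxRecDepth 100000 in
theorem keys_nodup : MARKET_OF.keys.Nodup := by decide

theorem names_nodup : (LOCATION_CLUSTERS.map Prod.fst).Nodup := by decide

theorem mem_items_iff (t c : String) :
    (t, c) ∈ MARKET_OF.items ↔ ∃ p ∈ LOCATION_CLUSTERS, c = p.1 ∧ InCluster p t := by
  rw [items_eq]
  simp only [List.mem_flatMap, InCluster]
  constructor
  · rintro ⟨p, hp, ha⟩
    obtain ⟨a, ha2, he⟩ := List.mem_map.mp ha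
    injection he with h1 h2
    subst h1; subst h2
    refine ⟨p, hp, rfl, ?_⟩
    rcases (PySem.Set.mem_union _ _ _).mp ha2 with h | h
    · exact Or.inl ((PySem.Set.mem_ofList _ _).mp h)
    · exact Or.inr (List.mem_singleton.mp h)
  · rintro ⟨p, hp, rfl, h⟩
    refine ⟨p, hp, List.mem_map.mpr ⟨t, ?_, rfl⟩⟩
    apply (PySem.Set.mem_union _ _ _).mpr
    rcases h with h | h
    · exact Or.inl ((PySem.Set.mem_ofList _ _).mpr h)
    · exact Or.inr (List.mem_singleton.mpr h)

theorem lookup_iff (t c : String) :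
    MARKET_OF.get? t = some c ↔ ∃ p ∈ LOCATION_CLUSTERS, c = p.1 ∧ InCluster p t := by
  rw [PySem.Dict.get?_eq_some_iff_mem_items MARKET_OF t c keys_nodup, mem_items_iff]

-- the per-cluster condition of A's loop is just "both locations name this cluster"
theorem condA_iff (p : String × PySem.Set String) (t1 t2 : String) :
    ((PySem.Set.union (PySem.Set.ofList (p.2.map PySem.Str.lower)) [PySem.Str.lower p.1]).contains t1
      && (PySem.Set.union (PySem.Set.ofList (p.2.map PySem.Str.lower)) [PySem.Str.lower p.1]).contains t2
    || (t1 == PySem.Str.lower p.1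
      && (PySem.Set.union (PySem.Set.ofList (p.2.map PySem.Str.lower)) [PySem.Str.lower p.1]).contains t2)
    || (t2 == PySem.Str.lower p.1
      && (PySem.Set.union (PySem.Set.ofList (p.2.map PySem.Str.lower)) [PySem.Str.lower p.1]).contains t1)) = true
      ↔ InCluster p t1 ∧ InCluster p t2 := by
  simp only [Bool.or_eq_true, Bool.and_eq_true, beq_iff_eq, PySem.Set.contains_iff,
    InCluster, PySem.Set.mem_union, PySem.Set.mem_ofList, List.mem_singleton]
  tauto

-- ===== VERDICT (by name: the statement is the Claim_ definition above) =====
theorem same_market_py_spec : Claim_equal_same_market_py := by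
  intro loc1 loc2 _
  unfold Spec_same_market_py
  by_cases hg : loc1 = "" ∨ loc2 = "" ∨ loc1 = loc2 ∨ loc1 = "India" ∨ loc2 = "India"
  · rcases hg with h | h | h | h | h <;>
      simp [same_market_py, same_market_py_alt, h]
  · push Not at hg
    obtain ⟨e1, e2, e3, e4, e5⟩ := hg
    simp only [same_market_py, same_market_py_alt]
    rw [if_neg (by tauto), if_neg e3, if_neg (by tauto), if_neg (by tauto)]
    simp only [lower_pyTitle]
    set t1 := PySem.Str.lower (PySem.Str.strip loc1) with ht1
    set t2 := PySem.Str.lower (PySem.Str.strip loc2) with ht2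
    rw [Bool.eq_iff_iff, List.any_eq_true]
    constructor
    · rintro ⟨p, hp, hc⟩
      rw [condA_iff] at hc
      rw [(lookup_iff t1 p.1).mpr ⟨p, hp, rfl, hc.1⟩,
          (lookup_iff t2 p.1).mpr ⟨p, hp, rfl, hc.2⟩]
      simp
    · intro hB
      rcases hg1 : MARKET_OF.get? t1 with _ | m1
      · rw [hg1] at hB; cases hB
      · rw [hg1] at hB
        simp only [beq_iff_eq] at hB
        rcases (lookup_iff t1 m1).mp hg1 with ⟨p, hp, rfl, hin1⟩
        rcases (lookup_iff t2 p.1).mp hB with ⟨q, hq, hqc, hin2⟩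
        have hqp : q = p := List.inj_on_of_nodup_map names_nodup hq hp hqc.symm
        exact ⟨p, hp, (condA_iff p t1 t2).mpr ⟨hin1, hqp ▸ hin2⟩⟩
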